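-- pv_equiv track=rewrite | github.com/KevinSGarrett/RichPanel | backend/src/richpanel_middleware/automation/delivery_estimate.py | _match_transit_window
-- ===== SOURCE A (Python) =====
-- from typing import Any, Dict, List, Optional
--
-- def _match_transit_window(
--     lowered_method: str, transit_map: Dict[str, tuple[int, int]]
-- ) -> Optional[tuple[int, int]]:
--     matches: list[tuple[str, tuple[int, int]]] = []
--     for key, window in transit_map.items():
--         if key and key in lowered_method:
--             matches.append((key, window))
--
--     if not matches:
--         return None
--
--     if any(char.isdigit() for char in lowered_method):
--         digit_matches = [
--             match
--             for match in matches
--             if any(char.isdigit() for char in match[0])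
--         ]
--         if digit_matches:
--             matches = digit_matches
--
--     best_key, best_window = sorted(
--         matches,
--         key=lambda item: (-len(item[0]), item[1][1], item[1][0], item[0]),
--     )[0]
--     return best_window
-- ===== SOURCE B (Python) =====
-- from typing import Dict, Optional
--
--
-- def _match_transit_window(
--     lowered_method: str, transit_map: Dict[str, tuple[int, int]]
-- ) -> Optional[tuple[int, int]]:
--     method_has_digit = any(ch.isdigit() for ch in lowered_method)
--     best = None  # (comparison tuple, window)
--     for key, window in transit_map.items():
--         if key and key in lowered_method:
--             prio = 0 if method_has_digit and any(ch.isdigit() for ch in key) else 1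
--             cand = (prio, -len(key), window[1], window[0], key)
--             if best is None or cand < best[0]:
--                 best = (cand, window)
--     return None if best is None else best[1]
-- ===== Notes on version B (the rewrite author's own statement) =====
-- stated objective: alternative
-- what changed: Replaces A's build-matches-list, conditional digit-refilter and sort-then-take-head with a single streaming pass that keeps the running minimum under a 5-tuple key folding the digit priority into the comparison.
import Mathlib
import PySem

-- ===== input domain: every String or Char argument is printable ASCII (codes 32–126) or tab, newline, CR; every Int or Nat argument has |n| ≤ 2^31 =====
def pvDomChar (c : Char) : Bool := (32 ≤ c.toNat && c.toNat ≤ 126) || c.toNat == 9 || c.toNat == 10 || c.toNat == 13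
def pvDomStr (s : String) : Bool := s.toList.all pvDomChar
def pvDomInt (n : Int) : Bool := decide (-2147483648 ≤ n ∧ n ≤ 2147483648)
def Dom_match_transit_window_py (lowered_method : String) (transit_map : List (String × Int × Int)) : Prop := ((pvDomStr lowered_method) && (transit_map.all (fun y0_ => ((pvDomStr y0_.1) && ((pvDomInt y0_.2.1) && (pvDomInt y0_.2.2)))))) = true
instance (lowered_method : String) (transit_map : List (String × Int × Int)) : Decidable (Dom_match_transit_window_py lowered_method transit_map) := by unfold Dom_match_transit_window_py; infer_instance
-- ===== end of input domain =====

-- B replaces A's build-matches-list / conditional digit-refilter / sort-and-take-head by one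
-- streaming pass keeping the running minimum under a 5-tuple key that folds the digit priority in
-- (objective: alternative decomposition, same asymptotic cost up to the removed sort).

-- ===== PORT A =====
-- Python tuple comparison (-len(key), window[1], window[0], key) is the lexicographic order on
-- Int ×ₗ Int ×ₗ Int ×ₗ String (Python's str '<' is Lean's '<' on String, per PySem).
def pvKeyA (m : String × Int × Int) : Int ×ₗ Int ×ₗ Int ×ₗ String :=
  toLex (-(PySem.Str.len m.1), toLex (m.2.2, toLex (m.2.1, m.1)))

-- the argument dict: the assoc list marshalled as a Python dict (insertion order, overwrite)
def pvItems (transit_map : List (String × Int × Int)) : List (String × Int × Int) :=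
  (PySem.Dict.ofList transit_map).items

def match_transit_window_py (lowered_method : String) (transit_map : List (String × Int × Int)) : Option (Int × Int) :=
  let ms := (pvItems transit_map).foldl  -- Python 'matches'
    (fun acc kw => if (!(kw.1 == "")) && PySem.Str.isIn kw.1 lowered_method then acc ++ [kw] else acc) []
  if ms = [] then none
  else
    let ms2 :=  -- Python 'matches' after the conditional digit refilter
      if lowered_method.toList.any PySem.Str.isdigit then
        let dms := ms.filter (fun m => m.1.toList.any PySem.Str.isdigit)
        if dms ≠ [] then dms else ms
      else ms
    match PySem.List.sorted ms2 pvKeyA false with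
    | [] => none
    | m :: _ => some m.2

-- ===== PORT B =====
def pvPrio (mdig : Bool) (m : String × Int × Int) : Int :=
  if mdig && m.1.toList.any PySem.Str.isdigit then 0 else 1

-- B's comparison tuple (prio, -len(key), window[1], window[0], key)
def pvKey5 (mdig : Bool) (m : String × Int × Int) : Int ×ₗ Int ×ₗ Int ×ₗ Int ×ₗ String :=
  toLex (pvPrio mdig m, pvKeyA m)

-- 'best = (cand, window) if best is None or cand < best[0] else best'
def pvStep (mdig : Bool) (acc : Option ((Int ×ₗ Int ×ₗ Int ×ₗ Int ×ₗ String) × (Int × Int)))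
    (kw : String × Int × Int) : Option ((Int ×ₗ Int ×ₗ Int ×ₗ Int ×ₗ String) × (Int × Int)) :=
  match acc with
  | none => some (pvKey5 mdig kw, kw.2)
  | some b => if pvKey5 mdig kw < b.1 then some (pvKey5 mdig kw, kw.2) else acc

def match_transit_window_py_alt (lowered_method : String) (transit_map : List (String × Int × Int)) : Option (Int × Int) :=
  let mdig := lowered_method.toList.any PySem.Str.isdigit
  let best := (pvItems transit_map).foldl
    (fun acc kw => if (!(kw.1 == "")) && PySem.Str.isIn kw.1 lowered_method then pvStep mdig acc kw else acc)
    none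
  best.map (·.2)

-- ===== PRECONDITION & SPEC =====
def Spec_match_transit_window_py (lowered_method : String) (transit_map : List (String × Int × Int)) (out : Option (Int × Int)) : Prop := out = match_transit_window_py_alt lowered_method transit_map
instance (lowered_method : String) (transit_map : List (String × Int × Int)) (out : Option (Int × Int)) : Decidable (Spec_match_transit_window_py lowered_method transit_map out) := by unfold Spec_match_transit_window_py; infer_instance

-- ===== CLAIM (what is proved, stated in full; the proofs are below) =====
def Claim_equal_match_transit_window_py : Prop := ∀ (lowered_method : String) (transit_map : List (String × Int × Int)), Dom_match_transit_window_py lowered_method transit_map → Spec_match_transit_window_py lowered_method transit_map (match_transit_window_py lowered_method transit_map)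

-- ===== LEMMAS AND PROOFS =====

lemma pvKey5_inj (mdig : Bool) (a b : String × Int × Int) (h : pvKey5 mdig a = pvKey5 mdig b) : a = b := by
  simp [pvKey5, pvKeyA, Prod.ext_iff] at h
  obtain ⟨-, -, h22, h21, h1⟩ := h
  exact Prod.ext h1 (Prod.ext h21 h22)

-- the fold keeps a candidate once it has one
lemma pvFold_some_of_some (mdig : Bool) (l : List (String × Int × Int))
    (b : (Int ×ₗ Int ×ₗ Int ×ₗ Int ×ₗ String) × (Int × Int)) :
    (l.foldl (pvStep mdig) (some b)).isSome := by
  induction l generalizing b with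
  | nil => simp
  | cons x l ih =>
    simp only [List.foldl_cons, pvStep]
    split_ifs with h
    · exact ih _
    · exact ih _

-- invariant of the running-minimum fold
lemma pvFold_min (mdig : Bool) (l : List (String × Int × Int)) :
    ∀ (acc : Option ((Int ×ₗ Int ×ₗ Int ×ₗ Int ×ₗ String) × (Int × Int)))
      (t : Int ×ₗ Int ×ₗ Int ×ₗ Int ×ₗ String) (w : Int × Int),
      l.foldl (pvStep mdig) acc = some (t, w) →
      ((acc = some (t, w)) ∨ ∃ m ∈ l, t = pvKey5 mdig m ∧ w = m.2) ∧
      (∀ y ∈ l, t ≤ pvKey5 mdig y) ∧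
      (∀ p, acc = some p → t ≤ p.1) := by
  induction l with
  | nil =>
    intro acc t w h
    simp at h
    exact ⟨Or.inl h, by simp, fun p hp => by rw [h] at hp; cases hp; exact le_refl _⟩
  | cons x l ih =>
    intro acc t w h
    simp only [List.foldl_cons] at h
    obtain ⟨hmem, hmin, hacc⟩ := ih (pvStep mdig acc x) t w h
    have hstep : t ≤ pvKey5 mdig x ∧ ∀ p, acc = some p → t ≤ p.1 := by
      cases acc with
      | none =>
        refine ⟨hacc (pvKey5 mdig x, x.2) (by simp [pvStep]), fun p hp => by cases hp⟩
      | some b =>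
        by_cases hlt : pvKey5 mdig x < b.1
        · have h1 : t ≤ pvKey5 mdig x := hacc (pvKey5 mdig x, x.2) (by simp [pvStep, hlt])
          exact ⟨h1, fun p hp => by cases hp; exact le_of_lt (lt_of_le_of_lt h1 hlt)⟩
        · have h1 : t ≤ b.1 := hacc b (by simp [pvStep, hlt])
          exact ⟨le_trans h1 (not_lt.mp hlt), fun p hp => by cases hp; exact h1⟩
    refine ⟨?_, ?_, hstep.2⟩
    · rcases hmem with hmem | ⟨m, hm, hm'⟩
      · cases acc with
        | none =>
          simp [pvStep] at hmem
          exact Or.inr ⟨x, by simp, hmem.1.symm, hmem.2.symm⟩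
        | some b =>
          by_cases hlt : pvKey5 mdig x < b.1
          · simp [pvStep, hlt] at hmem
            exact Or.inr ⟨x, by simp, hmem.1.symm, hmem.2.symm⟩
          · simp [pvStep, hlt] at hmem
            exact Or.inl (by rw [hmem])
      · exact Or.inr ⟨m, List.mem_cons_of_mem _ hm, hm'⟩
    · intro y hy
      rcases List.mem_cons.mp hy with hy | hy
      · exact hy ▸ hstep.1
      · exact hmin y hy

-- A's selected element is minimal in ALL of `matches` under B's 5-tuple key
lemma pvA_min (lm : String) (M : List (String × Int × Int)) (m : String × Int × Int)
    (tl : List (String × Int × Int))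
    (hsort : PySem.List.sorted
        (if lm.toList.any PySem.Str.isdigit then
          if M.filter (fun m => m.1.toList.any PySem.Str.isdigit) ≠ [] then
            M.filter (fun m => m.1.toList.any PySem.Str.isdigit)
          else M
        else M) pvKeyA false = m :: tl) :
    m ∈ M ∧ ∀ y ∈ M, pvKey5 (lm.toList.any PySem.Str.isdigit) m ≤ pvKey5 (lm.toList.any PySem.Str.isdigit) y := by
  set mdig := lm.toList.any PySem.Str.isdigit with hmdig
  have hle4 := PySem.List.key_head_sorted_le _ _ hsort
  have hmem : m ∈ _ := (PySem.List.mem_sorted _ _ _ m).mp (hsort ▸ List.mem_cons_self ..)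
  by_cases hd : mdig
  · by_cases hdm : M.filter (fun m => m.1.toList.any PySem.Str.isdigit) ≠ []
    · -- digit branch taken: m has a digit key
      rw [if_pos hd, if_pos hdm] at hmem hle4
      have hmdigit : m.1.toList.any PySem.Str.isdigit := (List.mem_filter.mp hmem).2
      refine ⟨(List.mem_filter.mp hmem).1, fun y hy => ?_⟩
      by_cases hyd : y.1.toList.any PySem.Str.isdigit
      · have : pvKeyA m ≤ pvKeyA y := hle4 y (List.mem_filter.mpr ⟨hy, hyd⟩)
        simp only [pvKey5, Prod.Lex.toLex_le_toLex]
        exact Or.inr ⟨by simp [pvPrio, hd, hmdigit, hyd], this⟩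
      · simp only [pvKey5, Prod.Lex.toLex_le_toLex]
        exact Or.inl (by simp [pvPrio, hd, hmdigit, hyd])
    · -- no matching key has a digit: every priority is 1
      rw [if_pos hd, if_neg hdm] at hmem hle4
      rw [not_ne_iff] at hdm
      refine ⟨hmem, fun y hy => ?_⟩
      have hyd : ¬ y.1.toList.any PySem.Str.isdigit := fun hyd =>
        (List.ne_nil_of_mem (List.mem_filter.mpr ⟨hy, hyd⟩)) hdm
      have hmd : ¬ m.1.toList.any PySem.Str.isdigit := fun hmd =>
        (List.ne_nil_of_mem (List.mem_filter.mpr ⟨hmem, hmd⟩)) hdm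
      simp only [pvKey5, Prod.Lex.toLex_le_toLex]
      exact Or.inr ⟨by simp [pvPrio, hmd, hyd], hle4 y hy⟩
  · -- the method has no digit: every priority is 1
    rw [if_neg hd] at hmem hle4
    refine ⟨hmem, fun y hy => ?_⟩
    simp only [pvKey5, Prod.Lex.toLex_le_toLex]
    exact Or.inr ⟨by simp [pvPrio, hd], hle4 y hy⟩

-- ===== VERDICT (by name: the statement is the Claim_ definition above) =====
theorem match_transit_window_py_spec : Claim_equal_match_transit_window_py := by
  intro lm tm _hdom
  unfold Spec_match_transit_window_py match_transit_window_py match_transit_window_py_alt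
  simp only [PySem.List.foldl_if_eq_foldl_filter,
    PySem.List.foldl_append_singleton_eq_self, List.nil_append]

  set mdig := lm.toList.any PySem.Str.isdigit with hmdig
  set M := (pvItems tm).filter (fun kw => (!(kw.1 == "")) && PySem.Str.isIn kw.1 lm) with hM
  by_cases hMe : M = []
  · simp [hMe]
  · rw [if_neg hMe]
    -- B's fold returns a candidate
    obtain ⟨m0, M', hM'⟩ := List.exists_cons_of_ne_nil hMe
    have hBsome : (M.foldl (pvStep mdig) none).isSome := by
      rw [hM', List.foldl_cons]
      show (M'.foldl (pvStep mdig) (pvStep mdig none m0)).isSome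
      exact pvFold_some_of_some mdig M' _
    obtain ⟨⟨t, w⟩, hB⟩ := Option.isSome_iff_exists.mp hBsome
    obtain ⟨hBmem, hBmin, -⟩ := pvFold_min mdig M none t w hB
    rcases hBmem with h | ⟨m', hm', ht, hw⟩
    · cases h
    -- A's sorted head
    have hM2 : (if mdig then
        if M.filter (fun m => m.1.toList.any PySem.Str.isdigit) ≠ [] then
          M.filter (fun m => m.1.toList.any PySem.Str.isdigit)
        else M
      else M) ≠ [] := by
      by_cases hd : mdig
      · by_cases hdm : M.filter (fun m => m.1.toList.any PySem.Str.isdigit) ≠ [] <;>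
          simp [hd, hdm, hMe]
      · simp [hd, hMe]
    obtain ⟨m, tl, hsort⟩ :
        ∃ m tl, PySem.List.sorted (if mdig then
          if M.filter (fun m => m.1.toList.any PySem.Str.isdigit) ≠ [] then
            M.filter (fun m => m.1.toList.any PySem.Str.isdigit)
          else M
        else M) pvKeyA false = m :: tl := by
      rcases h : PySem.List.sorted _ pvKeyA false with _ | ⟨m, tl⟩
      · exact absurd ((PySem.List.sorted_eq_nil_iff _ _ _).mp h) hM2
      · exact ⟨m, tl, rfl⟩
    obtain ⟨hAmem, hAmin⟩ := pvA_min lm M m tl hsort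
    rw [hsort, hB]
    -- uniqueness of the minimum: the keys agree, hence the elements agree
    have heq : pvKey5 mdig m = pvKey5 mdig m' :=
      le_antisymm (hAmin m' hm') (ht ▸ hBmin m hAmem)
    have : m = m' := pvKey5_inj mdig m m' heq
    simp [Option.map, hw, this]
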